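-- pv_equiv track=rewrite | github.com/Pranay04lohar/Prompt2Shell | backend/src/agent_utils.py | get_fallback_command
-- ===== SOURCE A (Python) =====
-- def get_fallback_command(instruction):
--     """Generate fallback command based on instruction keywords"""
--     instruction_lower = instruction.lower()
--
--     if any(word in instruction_lower for word in ['branch', 'git']):
--         return "git checkout -b <branch-name>"
--     elif any(word in instruction_lower for word in ['list', 'files']):
--         return "ls -la"
--     elif any(word in instruction_lower for word in ['directory', 'folder', 'mkdir']):
--         return "mkdir <directory-name>"
--     elif any(word in instruction_lower for word in ['virtual', 'venv', 'environment']):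
--         return "python3 -m venv <env_name>"
--     elif any(word in instruction_lower for word in ['pip', 'install', 'package']):
--         return "pip install <package_name>"
--     elif any(word in instruction_lower for word in ['docker', 'container']):
--         return "docker run <image_name>"
--     elif any(word in instruction_lower for word in ['first', 'lines', 'head']) and any(word in instruction_lower for word in ['file', 'log']):
--         if any(word in instruction_lower for word in ['ten', '10']):
--             return "head -n 10 <filename>"
--         else:
--             return "head <filename>"
--     elif any(word in instruction_lower for word in ['last', 'tail']) and any(word in instruction_lower for word in ['file', 'log']):
--         return "tail <filename>"
--     elif any(word in instruction_lower for word in ['read', 'view', 'show', 'cat']) and any(word in instruction_lower for word in ['file', 'log']):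
--         return "cat <filename>"
--     else:
--         return None
-- ===== SOURCE B (Python) =====
-- _KEYWORDS = ['branch', 'git', 'list', 'files', 'directory', 'folder', 'mkdir',
--              'virtual', 'venv', 'environment', 'pip', 'install', 'package',
--              'docker', 'container', 'first', 'lines', 'head', 'file', 'log',
--              'ten', '10', 'last', 'tail', 'read', 'view', 'show', 'cat']
--
-- # index the keywords by their first character, so the scan below only tries
-- # the keywords that can possibly start at the current position
-- _BY_FIRST = {}
-- for _kw in _KEYWORDS:
--     _BY_FIRST.setdefault(_kw[0], []).append(_kw)
--
--
-- def get_fallback_command(instruction):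
--     """One multi-pattern scan over the lowered text collects the set of
--     keywords that occur (keywords indexed by first character), then a
--     decision tree over that set picks the command."""
--     lower = instruction.lower()
--     found = set()
--     i = 0
--     while i < len(lower):
--         for kw in _BY_FIRST.get(lower[i], ()):
--             if lower.startswith(kw, i):
--                 found.add(kw)
--         i += 1
--
--     def has(*words):
--         return any(w in found for w in words)
--
--     if has('branch', 'git'):
--         return "git checkout -b <branch-name>"
--     if has('list', 'files'):
--         return "ls -la"
--     if has('directory', 'folder', 'mkdir'):
--         return "mkdir <directory-name>"
--     if has('virtual', 'venv', 'environment'):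
--         return "python3 -m venv <env_name>"
--     if has('pip', 'install', 'package'):
--         return "pip install <package_name>"
--     if has('docker', 'container'):
--         return "docker run <image_name>"
--     if has('file', 'log'):
--         if has('first', 'lines', 'head'):
--             return "head -n 10 <filename>" if has('ten', '10') else "head <filename>"
--         if has('last', 'tail'):
--             return "tail <filename>"
--         if has('read', 'view', 'show', 'cat'):
--             return "cat <filename>"
--     return None
-- ===== Notes on version B (the rewrite author's own statement) =====
-- stated objective: alternative
-- what changed: Instead of A's nine-branch if-elif chain each running its own substring searches, B makes one multi-pattern scan over the lowered instruction (keywords indexed by first character in a dict) collecting the set of keywords that occur, then picks the command by a decision tree over that set, with the common file/log requirement of the last three branches factored out.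
import Mathlib
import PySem

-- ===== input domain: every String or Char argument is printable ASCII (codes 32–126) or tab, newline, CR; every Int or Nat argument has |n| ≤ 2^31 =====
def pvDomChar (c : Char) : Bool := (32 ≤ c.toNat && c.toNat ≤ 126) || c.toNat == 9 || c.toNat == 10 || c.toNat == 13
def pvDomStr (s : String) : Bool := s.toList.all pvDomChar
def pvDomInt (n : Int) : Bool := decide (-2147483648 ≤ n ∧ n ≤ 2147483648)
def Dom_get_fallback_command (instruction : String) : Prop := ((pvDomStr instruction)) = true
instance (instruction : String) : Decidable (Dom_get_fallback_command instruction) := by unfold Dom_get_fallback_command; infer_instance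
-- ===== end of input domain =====

-- B replaces A's per-branch substring searches by one multi-pattern scan of the lowered
-- text (keywords indexed by first character) building the set of occurring keywords,
-- then a decision tree over that set (alternative decomposition; same cost).

-- ===== PORT A =====
def get_fallback_command (instruction : String) : Option String :=
  let lo := PySem.Str.lower instruction
  if ["branch", "git"].any (fun word => PySem.Str.isIn word lo) then
    some "git checkout -b <branch-name>"
  else if ["list", "files"].any (fun word => PySem.Str.isIn word lo) then
    some "ls -la"
  else if ["directory", "folder", "mkdir"].any (fun word => PySem.Str.isIn word lo) then
    some "mkdir <directory-name>"
  else if ["virtual", "venv", "environment"].any (fun word => PySem.Str.isIn word lo) then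
    some "python3 -m venv <env_name>"
  else if ["pip", "install", "package"].any (fun word => PySem.Str.isIn word lo) then
    some "pip install <package_name>"
  else if ["docker", "container"].any (fun word => PySem.Str.isIn word lo) then
    some "docker run <image_name>"
  else if ["first", "lines", "head"].any (fun word => PySem.Str.isIn word lo) &&
          ["file", "log"].any (fun word => PySem.Str.isIn word lo) then
    if ["ten", "10"].any (fun word => PySem.Str.isIn word lo) then
      some "head -n 10 <filename>"
    else
      some "head <filename>"
  else if ["last", "tail"].any (fun word => PySem.Str.isIn word lo) &&
          ["file", "log"].any (fun word => PySem.Str.isIn word lo) then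
    some "tail <filename>"
  else if ["read", "view", "show", "cat"].any (fun word => PySem.Str.isIn word lo) &&
          ["file", "log"].any (fun word => PySem.Str.isIn word lo) then
    some "cat <filename>"
  else
    none

-- ===== PORT B =====
def pvKeywords : List String :=
  ["branch", "git", "list", "files", "directory", "folder", "mkdir",
   "virtual", "venv", "environment", "pip", "install", "package",
   "docker", "container", "first", "lines", "head", "file", "log",
   "ten", "10", "last", "tail", "read", "view", "show", "cat"]

-- _BY_FIRST: keywords indexed by their first character (kw[0] = headD since every keyword is nonempty)
def pvByFirst : PySem.Dict Char (List String) :=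
  pvKeywords.foldl
    (fun d kw => d.insert (kw.toList.headD ' ') (d.getD (kw.toList.headD ' ') [] ++ [kw]))
    PySem.Dict.empty

-- The 'while i < len(lower)' scan, position i represented by the suffix lower[i:]:
-- lower[i] is the suffix's head and lower.startswith(kw, i) is startswith on the suffix.
def pvScan : List Char → PySem.Set String → PySem.Set String
  | [], found => found
  | c :: rest, found =>
      pvScan rest
        ((pvByFirst.getD c []).foldl
          (fun f kw => if PySem.Chars.startswith (c :: rest) kw.toList then PySem.Set.add f kw else f)
          found)

def pvHas (found : PySem.Set String) (words : List String) : Bool :=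
  words.any (fun w => PySem.Set.contains found w)

def get_fallback_command_alt (instruction : String) : Option String :=
  let lo := PySem.Str.lower instruction
  let found := pvScan lo.toList PySem.Set.empty
  if pvHas found ["branch", "git"] then some "git checkout -b <branch-name>"
  else if pvHas found ["list", "files"] then some "ls -la"
  else if pvHas found ["directory", "folder", "mkdir"] then some "mkdir <directory-name>"
  else if pvHas found ["virtual", "venv", "environment"] then some "python3 -m venv <env_name>"
  else if pvHas found ["pip", "install", "package"] then some "pip install <package_name>"
  else if pvHas found ["docker", "container"] then some "docker run <image_name>"
  else if pvHas found ["file", "log"] then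
    if pvHas found ["first", "lines", "head"] then
      if pvHas found ["ten", "10"] then some "head -n 10 <filename>" else some "head <filename>"
    else if pvHas found ["last", "tail"] then some "tail <filename>"
    else if pvHas found ["read", "view", "show", "cat"] then some "cat <filename>"
    else none
  else none

-- ===== PRECONDITION & SPEC =====
def Spec_get_fallback_command (instruction : String) (out : Option String) : Prop := out = get_fallback_command_alt instruction
instance (instruction : String) (out : Option String) : Decidable (Spec_get_fallback_command instruction out) := by unfold Spec_get_fallback_command; infer_instance

-- ===== CLAIM (what is proved, stated in full; the proofs are below) =====
def Claim_equal_get_fallback_command : Prop := ∀ (instruction : String), Dom_get_fallback_command instruction → Spec_get_fallback_command instruction (get_fallback_command instruction)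

-- ===== LEMMAS AND PROOFS =====

-- membership in a conditional-add fold
theorem pv_mem_foldl_condAdd (p : String → Bool) (ws : List String) :
    ∀ (f : PySem.Set String) (w : String),
      w ∈ ws.foldl (fun f kw => if p kw then PySem.Set.add f kw else f) f ↔
        w ∈ f ∨ (w ∈ ws ∧ p w = true) := by
  induction ws with
  | nil => intro f w; simp
  | cons x xs ih =>
      intro f w
      simp only [List.foldl_cons, ih]
      by_cases hx : p x = true
      · simp only [hx, if_pos]
        rw [PySem.Set.mem_add]
        constructor
        · rintro ((h | rfl) | h)
          · exact Or.inl h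
          · exact Or.inr ⟨List.mem_cons_self, hx⟩
          · exact Or.inr ⟨List.mem_cons_of_mem _ h.1, h.2⟩
        · rintro (h | ⟨hm, hp⟩)
          · exact Or.inl (Or.inl h)
          · rcases List.mem_cons.mp hm with rfl | hm'
            · exact Or.inl (Or.inr rfl)
            · exact Or.inr ⟨hm', hp⟩
      · simp only [hx, if_neg Bool.false_ne_true]
        constructor
        · rintro (h | h)
          · exact Or.inl h
          · exact Or.inr ⟨List.mem_cons_of_mem _ h.1, h.2⟩
        · rintro (h | ⟨hm, hp⟩)
          · exact Or.inl h
          · rcases List.mem_cons.mp hm with rfl | hm'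
            · exact absurd hp hx
            · exact Or.inr ⟨hm', hp⟩

-- every bucket of pvByFirst holds only keywords, with the matching first character
theorem pv_byFirst_items_sound :
    ∀ pr ∈ pvByFirst.items, ∀ w ∈ pr.2, w ∈ pvKeywords ∧ w.toList.headD ' ' = pr.1 := by decide

theorem pv_byFirst_sound (c : Char) (w : String) (h : w ∈ pvByFirst.getD c []) :
    w ∈ pvKeywords ∧ w.toList.headD ' ' = c := by
  rcases hg : pvByFirst.get? c with _ | v
  · rw [PySem.Dict.getD_eq_get?_getD, hg] at h
    simp at h
  · rw [PySem.Dict.getD_eq_get?_getD, hg] at h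
    exact pv_byFirst_items_sound (c, v) (PySem.Dict.mem_items_of_get?_eq_some _ hg) w h

-- every keyword is in its bucket
theorem pv_byFirst_complete :
    ∀ w ∈ pvKeywords, w ∈ pvByFirst.getD (w.toList.headD ' ') [] := by decide

-- keywords are nonempty
theorem pv_keywords_ne_nil : ∀ w ∈ pvKeywords, w.toList ≠ [] := by decide

-- scan membership characterisation
theorem pv_mem_scan (w : String) :
    ∀ (l : List Char) (f : PySem.Set String),
      w ∈ pvScan l f ↔
        w ∈ f ∨ (w ∈ pvKeywords ∧ ∃ j, w.toList <+: l.drop j ∧ l.drop j ≠ []) := by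
  intro l
  induction l with
  | nil =>
      intro f
      simp [pvScan]
  | cons c rest ih =>
      intro f
      rw [pvScan, ih, pv_mem_foldl_condAdd]
      constructor
      · rintro ((hf | ⟨hb, hsw⟩) | ⟨hk, j, hpre, hne⟩)
        · exact Or.inl hf
        · rcases pv_byFirst_sound c w hb with ⟨hk, _⟩
          refine Or.inr ⟨hk, 0, ?_, by simp⟩
          simpa using (PySem.Chars.startswith_iff _ _).mp hsw
        · exact Or.inr ⟨hk, j + 1, by simpa using hpre, by simpa using hne⟩
      · rintro (hf | ⟨hk, j, hpre, hne⟩)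
        · exact Or.inl (Or.inl hf)
        · cases j with
          | zero =>
              refine Or.inl (Or.inr ⟨?_, ?_⟩)
              · have hne' := pv_keywords_ne_nil w hk
                have hhead : w.toList.headD ' ' = c := by
                  rcases hw : w.toList with _ | ⟨a, as⟩
                  · exact absurd hw hne'
                  · rw [hw] at hpre
                    simp only [List.drop_zero] at hpre
                    rcases hpre with ⟨t, ht⟩
                    simp only [List.cons_append, List.cons.injEq] at ht
                    simp [ht.1]
                rw [← hhead]
                exact pv_byFirst_complete w hk
              · exact (PySem.Chars.startswith_iff _ _).mpr (by simpa using hpre)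
          | succ j' =>
              exact Or.inr ⟨hk, j', by simpa using hpre, by simpa using hne⟩

theorem pv_contains_scan (w : String) (hw : w ∈ pvKeywords) (l : List Char) :
    PySem.Set.contains (pvScan l PySem.Set.empty) w = PySem.Chars.isIn w.toList l := by
  rw [Bool.eq_iff_iff, PySem.Set.contains_iff, pv_mem_scan,
      ← PySem.Chars.exists_prefix_drop_iff_isIn]
  have hne := pv_keywords_ne_nil w hw
  constructor
  · rintro (hf | ⟨_, j, hpre, _⟩)
    · simp [PySem.Set.empty] at hf
    · exact ⟨j, hpre⟩
  · rintro ⟨j, hpre⟩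
    refine Or.inr ⟨hw, j, hpre, ?_⟩
    intro h0
    rw [h0] at hpre
    exact hne (List.prefix_nil.mp hpre)
-- ===== VERDICT (by name: the statement is the Claim_ definition above) =====
theorem get_fallback_command_spec : Claim_equal_get_fallback_command := by
  intro instruction _
  unfold Spec_get_fallback_command get_fallback_command get_fallback_command_alt
  have hc : ∀ w, w ∈ pvKeywords →
      PySem.Set.contains (pvScan (PySem.Str.lower instruction).toList PySem.Set.empty) w
        = PySem.Str.isIn w (PySem.Str.lower instruction) := by
    intro w hw
    rw [pv_contains_scan w hw, Bool.eq_iff_iff, PySem.Chars.isIn_iff_infix, PySem.Str.isIn_iff_infix]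
  simp only [pvHas, List.any_cons, List.any_nil, Bool.or_false]
  rw [hc "branch" (by decide),
      hc "git" (by decide),
      hc "list" (by decide),
      hc "files" (by decide),
      hc "directory" (by decide),
      hc "folder" (by decide),
      hc "mkdir" (by decide),
      hc "virtual" (by decide),
      hc "venv" (by decide),
      hc "environment" (by decide),
      hc "pip" (by decide),
      hc "install" (by decide),
      hc "package" (by decide),
      hc "docker" (by decide),
      hc "container" (by decide),
      hc "first" (by decide),
      hc "lines" (by decide),
      hc "head" (by decide),
      hc "file" (by decide),
      hc "log" (by decide),
      hc "ten" (by decide),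
      hc "10" (by decide),
      hc "last" (by decide),
      hc "tail" (by decide),
      hc "read" (by decide),
      hc "view" (by decide),
      hc "show" (by decide),
      hc "cat" (by decide)]
  generalize (PySem.Str.isIn "branch" (PySem.Str.lower instruction) || PySem.Str.isIn "git" (PySem.Str.lower instruction)) = g1
  generalize (PySem.Str.isIn "list" (PySem.Str.lower instruction) || PySem.Str.isIn "files" (PySem.Str.lower instruction)) = g2
  generalize (PySem.Str.isIn "directory" (PySem.Str.lower instruction) || (PySem.Str.isIn "folder" (PySem.Str.lower instruction) || PySem.Str.isIn "mkdir" (PySem.Str.lower instruction))) = g3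
  generalize (PySem.Str.isIn "virtual" (PySem.Str.lower instruction) || (PySem.Str.isIn "venv" (PySem.Str.lower instruction) || PySem.Str.isIn "environment" (PySem.Str.lower instruction))) = g4
  generalize (PySem.Str.isIn "pip" (PySem.Str.lower instruction) || (PySem.Str.isIn "install" (PySem.Str.lower instruction) || PySem.Str.isIn "package" (PySem.Str.lower instruction))) = g5
  generalize (PySem.Str.isIn "docker" (PySem.Str.lower instruction) || PySem.Str.isIn "container" (PySem.Str.lower instruction)) = g6
  generalize (PySem.Str.isIn "first" (PySem.Str.lower instruction) || (PySem.Str.isIn "lines" (PySem.Str.lower instruction) || PySem.Str.isIn "head" (PySem.Str.lower instruction))) = g7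
  generalize (PySem.Str.isIn "file" (PySem.Str.lower instruction) || PySem.Str.isIn "log" (PySem.Str.lower instruction)) = g8
  generalize (PySem.Str.isIn "ten" (PySem.Str.lower instruction) || PySem.Str.isIn "10" (PySem.Str.lower instruction)) = g9
  generalize (PySem.Str.isIn "last" (PySem.Str.lower instruction) || PySem.Str.isIn "tail" (PySem.Str.lower instruction)) = g10
  generalize (PySem.Str.isIn "read" (PySem.Str.lower instruction) || (PySem.Str.isIn "view" (PySem.Str.lower instruction) || (PySem.Str.isIn "show" (PySem.Str.lower instruction) || PySem.Str.isIn "cat" (PySem.Str.lower instruction)))) = g11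
  revert g1 g2 g3 g4 g5 g6 g7 g8 g9 g10 g11
  decide
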